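-- pv_equiv track=rewrite | github.com/roheet02/LeetCodeSolutionByRoheet | codes/Array/count_special_triplet.py | specialTriplet
-- ===== SOURCE A (Python) =====
-- def specialTriplet(nums):
--     mod = 10**9+7
--     from collections import Counter
--     rightCount=Counter(nums)
--     leftCount=Counter()
--     c=0
--     for j,val in enumerate(nums):
--         rightCount[val]-=1
--         target=2*val
--         c=(c+leftCount[target]*rightCount[target])%mod
--         leftCount[val]+=1
--     return c
-- ===== SOURCE B (Python) =====
-- def specialTriplet(nums):
--     # Build once a dict mapping each value to the ascending list of its
--     # occurrence indices; for each middle index j count occurrences of 2*nums[j]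
--     # before and after j by scanning that (usually short) per-value index list,
--     # and reduce the accumulated sum modulo 10**9+7 once at the end.
--     pos = {}
--     for i, v in enumerate(nums):
--         pos.setdefault(v, []).append(i)
--     total = 0
--     for j, v in enumerate(nums):
--         occ = pos.get(2 * v, [])
--         left = sum(1 for i in occ if i < j)
--         right = sum(1 for i in occ if i > j)
--         total += left * right
--     return total % (10**9 + 7)
-- ===== Notes on version B (the rewrite author's own statement) =====
-- stated objective: alternative
-- what changed: Replaces the single pass with two incrementally-updated Counters and per-step modular reduction by a prebuilt value-to-occurrence-index-list table queried per middle index (counting indices before/after j in the per-value list), with one final modular reduction.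
import Mathlib
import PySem

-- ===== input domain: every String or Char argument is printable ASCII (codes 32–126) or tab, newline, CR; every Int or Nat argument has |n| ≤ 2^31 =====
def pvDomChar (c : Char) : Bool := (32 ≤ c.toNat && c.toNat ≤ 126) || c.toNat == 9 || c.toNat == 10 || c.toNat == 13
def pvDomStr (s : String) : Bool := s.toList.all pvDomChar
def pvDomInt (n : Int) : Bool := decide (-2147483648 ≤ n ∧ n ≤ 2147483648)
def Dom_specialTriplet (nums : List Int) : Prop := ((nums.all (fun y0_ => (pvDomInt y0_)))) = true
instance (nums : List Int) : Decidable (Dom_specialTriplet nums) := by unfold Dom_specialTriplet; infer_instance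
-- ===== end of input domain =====

-- B replaces the incremental Counters by a prebuilt value->occurrence-index-list dict queried per index; alternative structure, no speed claim.

-- ===== PORT A =====
-- One pass over enumerate(nums): rightCount starts as Counter(nums), leftCount empty,
-- each step decrements rightCount[val], adds leftCount[2v]*rightCount[2v] mod 10^9+7,
-- then increments leftCount[val].  (% with positive modulus: Lean's Int.emod is exact here.)
def specialTriplet (nums : List Int) : Int :=
  let md : Int := 10 ^ 9 + 7
  let rightCount : PySem.Dict Int Int := PySem.Dict.counter nums
  let st := (PySem.List.enumerate nums 0).foldl
    (fun (st : PySem.Dict Int Int × PySem.Dict Int Int × Int) jv =>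
      let right := st.1.modify jv.2 0 (· - 1)
      let target := 2 * jv.2
      let c := (st.2.2 + st.2.1.getD target 0 * right.getD target 0) % md
      let left := st.2.1.modify jv.2 0 (· + 1)
      (right, left, c))
    (rightCount, PySem.Dict.empty, 0)
  st.2.2

-- ===== PORT B =====
-- pos: dict value -> list of occurrence indices (setdefault/append); per j,
-- occ = pos.get(2*v, []), left/right = counts of occ entries < j / > j,
-- total reduced mod 10**9+7 once at the end.
def specialTriplet_alt (nums : List Int) : Int :=
  let pos : PySem.Dict Int (List Int) := (PySem.List.enumerate nums 0).foldl
    (fun d iv => d.modify iv.2 [] (· ++ [iv.1])) PySem.Dict.empty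
  let total := (PySem.List.enumerate nums 0).foldl
    (fun (t : Int) jv =>
      let occ := pos.getD (2 * jv.2) []
      let left : Int := ((occ.filter (fun i => i < jv.1)).length : Int)
      let right : Int := ((occ.filter (fun i => jv.1 < i)).length : Int)
      t + left * right) 0
  total % (10 ^ 9 + 7)

-- ===== PRECONDITION & SPEC =====
def Spec_specialTriplet (nums : List Int) (out : Int) : Prop := out = specialTriplet_alt nums
instance (nums : List Int) (out : Int) : Decidable (Spec_specialTriplet nums out) := by unfold Spec_specialTriplet; infer_instance

-- ===== CLAIM (what is proved, stated in full; the proofs are below) =====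
def Claim_equal_specialTriplet : Prop := ∀ (nums : List Int), Dom_specialTriplet nums → Spec_specialTriplet nums (specialTriplet nums)

-- ===== LEMMAS AND PROOFS =====

-- The body of A's fold, named for the proofs.
def stepA (md : Int) (st : PySem.Dict Int Int × PySem.Dict Int Int × Int) (jv : Int × Int) :
    PySem.Dict Int Int × PySem.Dict Int Int × Int :=
  let right := st.1.modify jv.2 0 (· - 1)
  let target := 2 * jv.2
  let c := (st.2.2 + st.2.1.getD target 0 * right.getD target 0) % md
  let left := st.2.1.modify jv.2 0 (· + 1)
  (right, left, c)

-- B's per-index term, named for the proofs.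
def termB (nums : List Int) (jv : Int × Int) : Int :=
  let occ := ((PySem.List.enumerate nums 0).foldl
      (fun (d : PySem.Dict Int (List Int)) iv => d.modify iv.2 [] (· ++ [iv.1]))
      PySem.Dict.empty).getD (2 * jv.2) []
  ((occ.filter (fun i => i < jv.1)).length : Int) *
  ((occ.filter (fun i => jv.1 < i)).length : Int)

-- The occurrence-index list that B's dict stores for value t.
lemma occ_spec (nums : List Int) (t : Int) :
    ((PySem.List.enumerate nums 0).foldl
        (fun (d : PySem.Dict Int (List Int)) iv => d.modify iv.2 [] (· ++ [iv.1]))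
        PySem.Dict.empty).getD t []
      = ((PySem.List.enumerate nums 0).filter (fun iv => iv.2 == t)).map (·.1) := by
  have h : ((PySem.List.enumerate nums 0).map Prod.swap).foldl
      (fun (d : PySem.Dict Int (List Int)) p => d.modify p.1 [] (· ++ [p.2])) PySem.Dict.empty
      = (PySem.List.enumerate nums 0).foldl
        (fun d iv => d.modify iv.2 [] (· ++ [iv.1])) PySem.Dict.empty := by
    rw [List.foldl_map]
    rfl
  rw [← h, PySem.Dict.getD_foldl_modify_append]
  simp [List.filter_map, Function.comp_def, PySem.Dict.getD_empty]

-- Counting by value inside enumerate is List.count.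
lemma countP_enumerate_val (xs : List Int) (s t : Int) :
    (PySem.List.enumerate xs s).countP (fun iv => iv.2 == t) = xs.count t := by
  induction xs generalizing s with
  | nil => simp [PySem.List.enumerate_nil]
  | cons x xs ih =>
    rw [PySem.List.enumerate_cons]
    by_cases hx : x = t
    · subst hx; simp [ih]
    · simp [hx, ih]

lemma termB_eval (pre suf : List Int) (v : Int) :
    termB (pre ++ v :: suf) ((pre.length : Int), v)
      = (pre.count (2 * v) : Int) * (suf.count (2 * v) : Int) := by
  unfold termB
  rw [occ_spec]
  simp only [← List.countP_eq_length_filter, List.countP_map, List.countP_filter,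
    PySem.List.enumerate_append, PySem.List.enumerate_cons, List.countP_append,
    List.countP_cons, Function.comp_def]
  have hpre1 : (PySem.List.enumerate pre 0).countP
      (fun iv => decide (iv.1 < (pre.length : Int)) && (iv.2 == 2 * v))
      = pre.count (2 * v) := by
    rw [List.countP_congr (q := fun iv => iv.2 == 2 * v) ?_, countP_enumerate_val]
    intro iv hiv
    rcases (PySem.List.mem_enumerate_iff _ _ _).1 hiv with ⟨k, hk, rfl⟩
    simp; omega
  have hpre2 : (PySem.List.enumerate pre 0).countP
      (fun iv => decide ((pre.length : Int) < iv.1) && (iv.2 == 2 * v)) = 0 := by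
    rw [List.countP_eq_zero]
    intro iv hiv
    rcases (PySem.List.mem_enumerate_iff _ _ _).1 hiv with ⟨k, hk, rfl⟩
    simp; omega
  have hsuf1 : (PySem.List.enumerate suf ((0 : Int) + pre.length + 1)).countP
      (fun iv => decide (iv.1 < (pre.length : Int)) && (iv.2 == 2 * v)) = 0 := by
    rw [List.countP_eq_zero]
    intro iv hiv
    rcases (PySem.List.mem_enumerate_iff _ _ _).1 hiv with ⟨k, hk, rfl⟩
    simp; omega
  have hsuf2 : (PySem.List.enumerate suf ((0 : Int) + pre.length + 1)).countP
      (fun iv => decide ((pre.length : Int) < iv.1) && (iv.2 == 2 * v))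
      = suf.count (2 * v) := by
    rw [List.countP_congr (q := fun iv => iv.2 == 2 * v) ?_, countP_enumerate_val]
    intro iv hiv
    rcases (PySem.List.mem_enumerate_iff _ _ _).1 hiv with ⟨k, hk, rfl⟩
    simp; omega
  rw [hpre1, hpre2, hsuf1, hsuf2]
  simp

-- Core invariant: running A's loop over the suffix, with rightCount counting the
-- suffix, leftCount counting the prefix, and an already-reduced accumulator,
-- yields the reduced sum of B's terms.
lemma loop_eq (nums : List Int) (md : Int) :
    ∀ (suf pre : List Int) (R L : PySem.Dict Int Int) (c : Int),
      nums = pre ++ suf →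
      (∀ t, R.getD t 0 = (suf.count t : Int)) →
      (∀ t, L.getD t 0 = (pre.count t : Int)) →
      c % md = c →
      ((PySem.List.enumerate suf (pre.length : Int)).foldl (stepA md) (R, L, c)).2.2
        = (c + ((PySem.List.enumerate suf (pre.length : Int)).map (termB nums)).sum) % md := by
  intro suf
  induction suf with
  | nil =>
    intro pre R L c _ _ _ hc
    simp [PySem.List.enumerate_nil, hc]
  | cons v suf' ih =>
    intro pre R L c hnums hR hL hc
    rw [PySem.List.enumerate_cons]
    simp only [List.foldl_cons, List.map_cons, List.sum_cons]
    have hR' : ∀ t, (R.modify v 0 (· - 1)).getD t 0 = (suf'.count t : Int) := by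
      intro t
      rw [PySem.Dict.getD_modify]
      by_cases ht : t = v
      · subst ht
        rw [if_pos rfl, hR]
        simp
      · rw [if_neg ht, hR]
        simp [Ne.symm ht]
    have hL' : ∀ t, (L.modify v 0 (· + 1)).getD t 0 = ((pre ++ [v]).count t : Int) := by
      intro t
      rw [PySem.Dict.getD_modify]
      by_cases ht : t = v
      · subst ht
        rw [if_pos rfl, hL]
        simp
      · rw [if_neg ht, hL]
        simp [List.count_append, Ne.symm ht]
    have hlen : (pre.length : Int) + 1 = (((pre ++ [v]).length : Nat) : Int) := by
      simp
    have hterm : L.getD (2 * v) 0 * (R.modify v 0 (· - 1)).getD (2 * v) 0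
        = termB nums ((pre.length : Int), v) := by
      rw [hL, hR', hnums, termB_eval]
    have hstep : stepA md (R, L, c) ((pre.length : Int), v)
        = (R.modify v 0 (· - 1), L.modify v 0 (· + 1),
           (c + termB nums ((pre.length : Int), v)) % md) := by
      unfold stepA
      simp only [← hterm]
    rw [hstep, hlen,
        ih (pre ++ [v]) _ _ _ (by rw [hnums]; simp) hR' hL' (Int.emod_emod_of_dvd _ dvd_rfl)]
    rw [← hlen, Int.emod_add_emod, add_assoc]

-- ===== VERDICT (by name: the statement is the Claim_ definition above) =====
theorem specialTriplet_spec : Claim_equal_specialTriplet := by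
  intro nums _
  unfold Spec_specialTriplet
  have h := loop_eq nums (10 ^ 9 + 7) nums [] (PySem.Dict.counter nums) PySem.Dict.empty 0
    (by simp) (fun t => PySem.Dict.getD_counter nums t) (by simp) (by norm_num)
  simp only [List.length_nil, Nat.cast_zero] at h
  have hB : specialTriplet_alt nums
      = (0 + ((PySem.List.enumerate nums 0).map (termB nums)).sum) % (10 ^ 9 + 7) := by
    show ((PySem.List.enumerate nums 0).foldl (fun t jv => t + termB nums jv) 0) % (10 ^ 9 + 7)
        = (0 + ((PySem.List.enumerate nums 0).map (termB nums)).sum) % (10 ^ 9 + 7)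
    rw [PySem.List.foldl_add]
  rw [hB]
  exact h
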